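-- pv_equiv track=rewrite | github.com/songyw0517/programmers_algorithm | python/Summer_Winter Coding(~2018)/영어 끝말잇기.py | solution
-- ===== SOURCE A (Python) =====
-- def solution(n, words):
--     answer = []
--     duplicate = {}
--     count = 1 # 횟수
--     # [실행] 버튼을 누르면 출력 값을 볼 수 있습니다.
--     number = 1 # 첫번째 사람
--     word = words.pop(0)
--     duplicate[word]=0
--     first_spell = word[-1]
--     for word in words:
--         number +=1 # 다음 사람
--         if number > n:
--             number%=n
--             count+=1 # 횟수 증가
--         if word[0] != first_spell or (word in duplicate):
--             return [number, count]
--         else: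
--             first_spell = word[-1]
--             duplicate[word]=0
--     return [0,0]
-- ===== SOURCE B (Python) =====
-- def solution(n, words):
--     first = words.pop(0)
--     full = [first] + words
--     # pass 1: first index whose first letter breaks the chain of last letters
--     m = len(full)
--     for i in range(1, len(full)):
--         if full[i][0] != full[i - 1][-1]:
--             m = i
--             break
--     # pass 2: first index holding a word already seen earlier in the list
--     seen = {}
--     d = len(full)
--     for i, w in enumerate(full):
--         if w in seen:
--             d = i
--             break
--         seen[w] = i
--     i = min(m, d)
--     if i == len(full):
--         return [0, 0]
--     return [i % n + 1, i // n + 1]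
-- ===== Notes on version B (the rewrite author's own statement) =====
-- stated objective: alternative
-- what changed: B replaces A's single stateful pass (running player/turn counters with modular reset plus a conditionally-grown dict) by two independent staged passes over the whole list - first letter-chain-mismatch index and first duplicate index, each computed unconditionally - then takes their minimum and converts that one index to [player, turn] in closed form.
-- intended difference: For n = 1 (a single player, below the game's minimum of 2) on lists of >= 2 words containing a rule violation, A's every-step modular reset reports the failing player as number % 1 = 0, e.g. [0, 2], while B's closed form [i % n + 1, i // n + 1] reports [1, turn] - the only player - which is the intended reading. — e.g. on solution(1, ["ab", "xz"]): A returns [0, 2], B returns [1, 2]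
-- outside the precondition, e.g. on solution(0, ['ab']): A returns [0, 0], B returns [0, 0]; on solution(-2, ['ab', 'xz']): A returns [0, 2], B returns [0, 0]; on solution(2, ['ab', 'xz', '']): A returns [2, 1], B returns [2, 1]
import Mathlib
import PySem

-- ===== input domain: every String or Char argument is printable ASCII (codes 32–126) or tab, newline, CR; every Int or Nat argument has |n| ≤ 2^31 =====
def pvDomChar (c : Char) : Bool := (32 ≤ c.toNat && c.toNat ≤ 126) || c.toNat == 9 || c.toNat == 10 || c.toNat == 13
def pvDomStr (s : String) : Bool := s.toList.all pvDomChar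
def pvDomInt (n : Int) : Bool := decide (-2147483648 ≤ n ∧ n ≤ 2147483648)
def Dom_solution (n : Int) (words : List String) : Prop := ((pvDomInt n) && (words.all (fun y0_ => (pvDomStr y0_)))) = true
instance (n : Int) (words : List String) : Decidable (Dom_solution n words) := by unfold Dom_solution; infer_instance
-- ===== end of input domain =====

-- B derives the answer from two independent staged passes (first chain-mismatch index, first
-- duplicate index) combined by min, instead of A's single stateful pass with running counters
-- (objective: alternative decomposition; both pop words[0], mutating the argument identically —
-- the claim is about the return value).


-- ===== PORT A =====
-- the for-loop of A: state number, count, duplicate (dict), first_spell (word[-1]; Option = raise on "")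
def solutionLoopA (n : Int) (rest : List String) (number count : Int)
    (dup : PySem.Dict String Int) (first_spell : Option Char) : List Int :=
  match rest with
  | [] => [0, 0]
  | w :: rest' =>
      let number1 := number + 1
      let number2 := if number1 > n then PySem.Int.mod number1 n else number1
      let count2 := if number1 > n then count + 1 else count
      if PySem.Str.pyGet? w 0 ≠ first_spell ∨ dup.contains w = true then [number2, count2]
      else solutionLoopA n rest' number2 count2 (dup.insert w 0) (PySem.Str.pyGet? w (-1))

def solution (n : Int) (words : List String) : List Int :=
  match words with
  | [] => [0, 0]   -- words.pop(0) raises IndexError in Python; outside Pre_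
  | word :: rest =>
      solutionLoopA n rest 1 1 (PySem.Dict.empty.insert word 0) (PySem.Str.pyGet? word (-1))

-- ===== PORT B =====
-- pass 1 of Source B: first index i ≥ 1 with full[i][0] ≠ full[i-1][-1], else len(full)
def solutionAltMismatch (prev : String) (rest : List String) (i : Int) : Int :=
  match rest with
  | [] => i
  | w :: rest' =>
      if PySem.Str.pyGet? w 0 ≠ PySem.Str.pyGet? prev (-1) then i
      else solutionAltMismatch w rest' (i + 1)

-- pass 2 of Source B: first index holding a word already seen earlier, else len(full)
def solutionAltDup (rest : List String) (seen : PySem.Dict String Int) (i : Int) : Int :=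
  match rest with
  | [] => i
  | w :: rest' =>
      if seen.contains w then i else solutionAltDup rest' (seen.insert w i) (i + 1)

def solution_alt (n : Int) (words : List String) : List Int :=
  match words with
  | [] => [0, 0]   -- words.pop(0) raises IndexError in Python; outside Pre_
  | first :: rest =>
      let full := first :: rest
      let m := solutionAltMismatch first rest 1
      let d := solutionAltDup full PySem.Dict.empty 0
      let i := min m d
      if i = (full.length : Int) then [0, 0]
      else [PySem.Int.mod i n + 1, PySem.Int.floordiv i n + 1]

-- ===== PRECONDITION & SPEC =====
-- Pre_ restricts to the game's natural domain: a positive player count (n = 0 raises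
-- ZeroDivisionError at the first counter reset, i.e. whenever a second word exists; a negative
-- player count is malformed input, on which A returns accidental counter values), a nonempty
-- word list (pop(0) raises on []) and no empty words (word[0]/word[-1] raise IndexError when A
-- reaches ""); A still returns on n ≤ 0 singletons, on negative n, and on lists whose "" lies
-- after the first failure.
def Pre_solution (n : Int) (words : List String) : Prop :=
  1 ≤ n ∧ words ≠ [] ∧ ∀ w ∈ words, w ≠ ""
instance (n : Int) (words : List String) : Decidable (Pre_solution n words) := by
  unfold Pre_solution; infer_instance

def pvWitness_solution : Int × List String := (3, ["tank", "kick", "know", "wheel", "land"])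

-- For n = 1 (a single player, below the game's minimum of 2) on lists of ≥ 2 words containing
-- a rule violation (a duplicate or an adjacent last/first-letter mismatch), A's every-step
-- modular reset reports the failing player as number % 1 = 0, e.g. [0, 2], while B's closed
-- form [i % n + 1, i // n + 1] reports [1, turn] — the only player — consistently with the
-- n ≥ 2 case, which is the intended reading.
def D_solution (n : Int) (words : List String) : Prop :=
  n < 2 ∧ 2 ≤ words.length ∧
    (¬ words.Nodup ∨ ∃ p ∈ words.zip words.tail,
      PySem.Str.pyGet? p.2 0 ≠ PySem.Str.pyGet? p.1 (-1))
instance (n : Int) (words : List String) : Decidable (D_solution n words) := by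
  unfold D_solution; infer_instance

def Spec_solution (n : Int) (words : List String) (out : List Int) : Prop := ¬ D_solution n words → out = solution_alt n words
instance (n : Int) (words : List String) (out : List Int) : Decidable (Spec_solution n words out) := by unfold Spec_solution; infer_instance

def pvDiffWitness_solution : Int × List String := (1, ["ab", "xz"])
def pvDiffWitnessOut_solution : (List Int) × (List Int) := ([0, 2], [1, 2])

-- ===== CLAIM (what is proved, stated in full; the proofs are below) =====
def Claim_unchanged_solution : Prop := ∀ (n : Int) (words : List String), Dom_solution n words → Pre_solution n words → Spec_solution n words (solution n words)
def Claim_changed_solution : Prop := Dom_solution (pvDiffWitness_solution.1) (pvDiffWitness_solution.2) ∧ Pre_solution (pvDiffWitness_solution.1) (pvDiffWitness_solution.2) ∧ D_solution (pvDiffWitness_solution.1) (pvDiffWitness_solution.2) ∧ solution (pvDiffWitness_solution.1) (pvDiffWitness_solution.2) = pvDiffWitnessOut_solution.1 ∧ solution_alt (pvDiffWitness_solution.1) (pvDiffWitness_solution.2) = pvDiffWitnessOut_solution.2 ∧ pvDiffWitnessOut_solution.1 ≠ pvDiffWitnessOut_solution.2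

-- ===== LEMMAS AND PROOFS =====

-- proof-side characterisation of A's loop: the first failing original index (≥ 1), or none
def firstFail (rest : List String) (i : Int) (last : Option Char) (seen : PySem.Set String) : Option Int :=
  match rest with
  | [] => none
  | w :: rest' =>
      if PySem.Str.pyGet? w 0 ≠ last ∨ w ∈ seen then some i
      else firstFail rest' (i + 1) (PySem.Str.pyGet? w (-1)) (PySem.Set.add seen w)

-- stepping the (player, turn) closed forms across one index
theorem divmod_succ_reset (n a : Int) (h : 0 < n) (h2 : a % n = n - 1) :
    (a + 1) % n = 0 ∧ (a + 1) / n = a / n + 1 := by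
  have hd := Int.mul_ediv_add_emod a n
  have key : (a + 1) / n = a / n + 1 ∧ (a + 1) % n = 0 := by
    rw [Int.ediv_emod_unique h]
    exact ⟨by nlinarith, le_refl _, h⟩
  exact ⟨key.2, key.1⟩

theorem divmod_succ_mid (n a : Int) (h : 0 < n) (h2 : a % n < n - 1) :
    (a + 1) % n = a % n + 1 ∧ (a + 1) / n = a / n := by
  have hd := Int.mul_ediv_add_emod a n
  have h0 : 0 ≤ a % n := Int.emod_nonneg a (by omega)
  have key : (a + 1) / n = a / n ∧ (a + 1) % n = a % n + 1 := by
    rw [Int.ediv_emod_unique h]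
    exact ⟨by nlinarith, by omega, by omega⟩
  exact ⟨key.2, key.1⟩

-- the loop invariant: A's counters are the closed forms of the previous index,
-- A's dict and the characterisation's set contain the same words
theorem loop_eq (n : Int) (hn : 2 ≤ n) (rest : List String) :
    ∀ (i : Int) (dup : PySem.Dict String Int) (seen : PySem.Set String)
      (_ : ∀ x, dup.contains x = true ↔ x ∈ seen) (last : Option Char),
    solutionLoopA n rest (PySem.Int.mod (i - 1) n + 1) (PySem.Int.floordiv (i - 1) n + 1) dup last =
      (match firstFail rest i last seen with
      | none => [0, 0]
      | some j => [PySem.Int.mod j n + 1, PySem.Int.floordiv j n + 1]) := by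
  induction rest with
  | nil => intro i dup seen hms last; rfl
  | cons w rest' ih =>
    intro i dup seen hms last
    have hn0 : (0:Int) < n := by omega
    have hlt : (i - 1) % n < n := Int.emod_lt_of_pos _ hn0
    have h0 : 0 ≤ (i - 1) % n := Int.emod_nonneg _ (by omega)
    have hii : i - 1 + 1 = i := by omega
    have hnum : (if PySem.Int.mod (i - 1) n + 1 + 1 > n
          then PySem.Int.mod (PySem.Int.mod (i - 1) n + 1 + 1) n
          else PySem.Int.mod (i - 1) n + 1 + 1) = PySem.Int.mod i n + 1 := by
      simp only [PySem.Int.mod_eq_emod_of_pos hn0]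
      by_cases h : (i - 1) % n + 1 + 1 > n
      · have he : (i - 1) % n = n - 1 := by omega
        have hr := divmod_succ_reset n (i - 1) hn0 he
        rw [hii] at hr
        rw [if_pos h, he, hr.1]
        have hone : (n - 1 + 1 + 1) % n = 1 % n := by
          rw [show n - 1 + 1 + 1 = 1 + n * 1 by ring, Int.add_mul_emod_self_left]
        rw [hone, Int.emod_eq_of_lt (by omega) (by omega)]
        norm_num
      · have he : (i - 1) % n < n - 1 := by omega
        have hr := divmod_succ_mid n (i - 1) hn0 he
        rw [hii] at hr
        rw [if_neg h, hr.1]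
    have hcnt : (if PySem.Int.mod (i - 1) n + 1 + 1 > n
          then PySem.Int.floordiv (i - 1) n + 1 + 1
          else PySem.Int.floordiv (i - 1) n + 1) = PySem.Int.floordiv i n + 1 := by
      simp only [PySem.Int.mod_eq_emod_of_pos hn0, PySem.Int.floordiv_eq_ediv_of_pos hn0]
      by_cases h : (i - 1) % n + 1 + 1 > n
      · have he : (i - 1) % n = n - 1 := by omega
        have hr := divmod_succ_reset n (i - 1) hn0 he
        rw [hii] at hr
        rw [if_pos h, hr.2]
      · have he : (i - 1) % n < n - 1 := by omega
        have hr := divmod_succ_mid n (i - 1) hn0 he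
        rw [hii] at hr
        rw [if_neg h, hr.2]
    have hcond : (PySem.Str.pyGet? w 0 ≠ last ∨ dup.contains w = true) ↔
        (PySem.Str.pyGet? w 0 ≠ last ∨ w ∈ seen) := or_congr_right (hms w)
    simp only [solutionLoopA, firstFail, hnum, hcnt]
    rw [if_congr hcond rfl rfl]
    by_cases hc : PySem.Str.pyGet? w 0 ≠ last ∨ w ∈ seen
    · rw [if_pos hc, if_pos hc]
    · rw [if_neg hc, if_neg hc]
      have hms' : ∀ x, (dup.insert w 0).contains x = true ↔ x ∈ PySem.Set.add seen w := by
        intro x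
        rw [PySem.Dict.contains_insert, Bool.or_eq_true, beq_iff_eq, PySem.Set.mem_add,
          ← hms x]
        tauto
      have hrec := ih (i + 1) (dup.insert w 0) (PySem.Set.add seen w) hms'
        (PySem.Str.pyGet? w (-1))
      rw [show i + 1 - 1 = i by omega] at hrec
      exact hrec

-- lower bounds for B's two passes
theorem mismatch_ge (rest : List String) : ∀ (p : String) (i : Int),
    i ≤ solutionAltMismatch p rest i := by
  induction rest with
  | nil => intro p i; simp [solutionAltMismatch]
  | cons w rest' ih =>
    intro p i
    simp only [solutionAltMismatch]
    split
    · exact le_refl _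
    · exact le_trans (by omega) (ih w (i + 1))

theorem dup_ge (rest : List String) : ∀ (D : PySem.Dict String Int) (i : Int),
    i ≤ solutionAltDup rest D i := by
  induction rest with
  | nil => intro D i; simp [solutionAltDup]
  | cons w rest' ih =>
    intro D i
    simp only [solutionAltDup]
    split
    · exact le_refl _
    · exact le_trans (by omega) (ih _ (i + 1))

-- a found failure index lies strictly inside the list
theorem firstFail_lt (rest : List String) : ∀ (i : Int) (last : Option Char)
    (S : PySem.Set String) (j : Int), firstFail rest i last S = some j → j < i + rest.length := by
  induction rest with
  | nil => intro i last S j h; simp [firstFail] at h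
  | cons w rest' ih =>
    intro i last S j h
    simp only [firstFail] at h
    split at h
    · simp only [Option.some.injEq] at h
      simp [← h]
    · have := ih (i + 1) (PySem.Str.pyGet? w (-1)) (PySem.Set.add S w) j h
      simp only [List.length_cons]
      push_cast at this ⊢
      omega

-- the failure index of A's single pass is the minimum of B's two pass results
theorem firstFail_min (rest : List String) : ∀ (i : Int) (p : String)
    (D : PySem.Dict String Int) (S : PySem.Set String)
    (_ : ∀ x, D.contains x = true ↔ x ∈ S),
    (match firstFail rest i (PySem.Str.pyGet? p (-1)) S with
     | none => i + rest.length
     | some j => j)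
    = min (solutionAltMismatch p rest i) (solutionAltDup rest D i) := by
  induction rest with
  | nil => intro i p D S hms; simp [firstFail, solutionAltMismatch, solutionAltDup]
  | cons w rest' ih =>
    intro i p D S hms
    by_cases h1 : PySem.Str.pyGet? w 0 ≠ PySem.Str.pyGet? p (-1)
    · -- mismatch at i: both sides are i (the dup pass never returns below i)
      have hd := dup_ge (w :: rest') D i
      simp only [firstFail, solutionAltMismatch, if_pos h1, if_pos (Or.inl h1)]
      omega
    · by_cases h2 : w ∈ S
      · -- duplicate at i: the mismatch pass is ≥ i + 1, the dup pass is i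
        have hm := mismatch_ge rest' w (i + 1)
        have hw : D.contains w = true := (hms w).mpr h2
        simp only [firstFail, solutionAltMismatch, solutionAltDup, if_pos (Or.inr h2),
          if_neg h1, if_pos hw]
        omega
      · -- neither: all three recurse in step
        have hw : ¬ D.contains w = true := fun h => h2 ((hms w).mp h)
        have hc : ¬ (PySem.Str.pyGet? w 0 ≠ PySem.Str.pyGet? p (-1) ∨ w ∈ S) := by tauto
        have hms' : ∀ x, (D.insert w i).contains x = true ↔ x ∈ PySem.Set.add S w := by
          intro x
          rw [PySem.Dict.contains_insert, Bool.or_eq_true, beq_iff_eq, PySem.Set.mem_add,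
            ← hms x]
          tauto
        have hrec := ih (i + 1) w (D.insert w i) (PySem.Set.add S w) hms'
        simp only [firstFail, solutionAltMismatch, solutionAltDup, if_neg hc, if_neg h1,
          if_neg hw, List.length_cons]
        rw [← hrec]
        cases hff : firstFail rest' (i + 1) (PySem.Str.pyGet? w (-1)) (PySem.Set.add S w) with
        | none => simp; ring
        | some j => simp

-- with no failure anywhere, A's loop returns [0, 0] whatever the counters hold
theorem loopA_none (rest : List String) : ∀ (i n number count : Int)
    (dup : PySem.Dict String Int) (S : PySem.Set String) (last : Option Char),
    (∀ x, dup.contains x = true ↔ x ∈ S) → firstFail rest i last S = none →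
    solutionLoopA n rest number count dup last = [0, 0] := by
  induction rest with
  | nil => intro i n number count dup S last hms hff; rfl
  | cons w rest' ih =>
    intro i n number count dup S last hms hff
    simp only [firstFail] at hff
    split at hff
    · exact absurd hff (by simp)
    · rename_i hc
      have hcd : ¬ (PySem.Str.pyGet? w 0 ≠ last ∨ dup.contains w = true) := by
        rw [or_congr_right (hms w)]; exact hc
      have hms' : ∀ x, (dup.insert w 0).contains x = true ↔ x ∈ PySem.Set.add S w := by
        intro x
        rw [PySem.Dict.contains_insert, Bool.or_eq_true, beq_iff_eq, PySem.Set.mem_add,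
          ← hms x]
        tauto
      simp only [solutionLoopA, if_neg hcd]
      exact ih (i + 1) n _ _ _ _ _ hms' hff

-- a valid chain with no repeats never fails
theorem firstFail_none (rest : List String) : ∀ (prev : String) (i : Int) (S : PySem.Set String),
    (∀ p ∈ (prev :: rest).zip rest, PySem.Str.pyGet? p.2 0 = PySem.Str.pyGet? p.1 (-1)) →
    (∀ x ∈ rest, x ∉ S) → rest.Nodup →
    firstFail rest i (PySem.Str.pyGet? prev (-1)) S = none := by
  induction rest with
  | nil => intro prev i S _ _ _; rfl
  | cons w rest' ih =>
    intro prev i S hchain hS hnd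
    have hhead : PySem.Str.pyGet? w 0 = PySem.Str.pyGet? prev (-1) :=
      hchain (prev, w) (by simp [List.zip_cons_cons])
    have hwS : w ∉ S := hS w (by simp)
    have hc : ¬ (PySem.Str.pyGet? w 0 ≠ PySem.Str.pyGet? prev (-1) ∨ w ∈ S) := by
      push_neg; exact ⟨hhead, hwS⟩
    simp only [firstFail, if_neg hc]
    refine ih w (i + 1) (PySem.Set.add S w) ?_ ?_ hnd.of_cons
    · intro p hp
      exact hchain p (by simp [List.zip_cons_cons] at hp ⊢; tauto)
    · intro x hx
      rw [PySem.Set.mem_add]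
      push_neg
      exact ⟨hS x (by simp [hx]), fun he => (List.nodup_cons.mp hnd).1 (he ▸ hx)⟩

-- ===== VERDICT (by name: the statement is the Claim_ definition above) =====
theorem solution_spec : Claim_unchanged_solution := by
  intro n words hdom hpre
  obtain ⟨hn, hne, hwords⟩ := hpre
  unfold Spec_solution
  intro hnD
  cases words with
  | nil => exact absurd rfl hne
  | cons word rest =>
    simp only [solution, solution_alt]
    have hms : ∀ x, (PySem.Dict.empty.insert word 0).contains x = true ↔
        x ∈ PySem.Set.ofList [word] := by
      intro x
      rw [PySem.Dict.contains_insert, PySem.Dict.contains_empty, Bool.or_eq_true, beq_iff_eq,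
        PySem.Set.mem_ofList, List.mem_singleton]
      simp
    have hDstep : solutionAltDup (word :: rest) PySem.Dict.empty 0 =
        solutionAltDup rest (PySem.Dict.empty.insert word 0) 1 := by
      simp [solutionAltDup, PySem.Dict.contains_empty]
    have hmin := firstFail_min rest 1 word (PySem.Dict.empty.insert word 0)
      (PySem.Set.ofList [word]) hms
    by_cases hn2 : 2 ≤ n
    · -- n ≥ 2: the counter invariant gives A's loop as the closed forms of the failure index
      have hn0 : (0:Int) < n := by omega
      have hA := loop_eq n hn2 rest 1 (PySem.Dict.empty.insert word 0)
        (PySem.Set.ofList [word]) hms (PySem.Str.pyGet? word (-1))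
      have hm0 : PySem.Int.mod (1 - 1 : Int) n = 0 := by
        rw [PySem.Int.mod_eq_emod_of_pos hn0]; norm_num
      have hf0 : PySem.Int.floordiv (1 - 1 : Int) n = 0 := by
        rw [PySem.Int.floordiv_eq_ediv_of_pos hn0]; norm_num
      rw [hm0, hf0, zero_add] at hA
      rw [hA, hDstep, ← hmin]
      cases hff : firstFail rest 1 (PySem.Str.pyGet? word (-1)) (PySem.Set.ofList [word]) with
      | none =>
        simp only [List.length_cons]
        rw [if_pos (by push_cast; ring)]
      | some j =>
        have hj := firstFail_lt rest 1 (PySem.Str.pyGet? word (-1)) (PySem.Set.ofList [word]) j hff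
        simp only [List.length_cons] at hj ⊢
        rw [if_neg (by push_cast at hj ⊢; omega)]
    · -- n < 2: outside D_ the list is a singleton or an unbroken chain, so both sides are [0, 0]
      have hff : firstFail rest 1 (PySem.Str.pyGet? word (-1)) (PySem.Set.ofList [word]) = none := by
        cases rest with
        | nil => rfl
        | cons w rest' =>
          unfold D_solution at hnD
          push_neg at hnD
          obtain ⟨hdup, hmm⟩ := hnD (by omega) (by simp)
          refine firstFail_none (w :: rest') word 1 (PySem.Set.ofList [word]) hmm ?_ hdup.of_cons
          · intro x hx
            rw [PySem.Set.mem_ofList, List.mem_singleton]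
            intro he
            exact (List.nodup_cons.mp hdup).1 (he ▸ hx)
      rw [loopA_none rest 1 n 1 1 (PySem.Dict.empty.insert word 0)
        (PySem.Set.ofList [word]) (PySem.Str.pyGet? word (-1)) hms hff,
        hDstep, ← hmin, hff]
      simp only [List.length_cons]
      rw [if_pos (by push_cast; ring)]

theorem solution_changed : Claim_changed_solution := by
  unfold Claim_changed_solution; decide
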